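-- pv_equiv track=rewrite | github.com/SongJungHyun1004/Coding_Test | 07주차/옹알이.py | canPronounce
-- ===== SOURCE A (Python) =====
-- def canPronounce(word):
--     a = 0; y = 0; w = 0; m = 0;
--     i = 0
--     while i < len(word):
--         if word[i:i+3] == "aya":
--             if a:
--                 return False
--             a = 1
--             i += 3
--             y = 0; w = 0; m = 0;
--         elif word[i:i+3] == "woo":
--             if w:
--                 return False
--             w = 1
--             i += 3
--             a = 0; y = 0; m = 0;
--         elif word[i:i+2] == "ye":
--             if y:
--                 return False
--             y = 1
--             i += 2
--             a = 0; w = 0; m = 0;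
--         elif word[i:i+2] == "ma":
--             if m:
--                 return False
--             m = 1
--             i += 2
--             a = 0; y = 0; w = 0;
--         else:
--             return False
--     return True
-- ===== SOURCE B (Python) =====
-- def canPronounce(word):
--     tokens = []
--     rest = word
--     while rest:
--         for syl in ("aya", "woo", "ye", "ma"):
--             if rest.startswith(syl):
--                 tokens.append(syl)
--                 rest = rest[len(syl):]
--                 break
--         else:
--             return False
--     return all(prev != cur for prev, cur in zip(tokens, tokens[1:]))
-- ===== Notes on version B (the rewrite author's own statement) =====
-- stated objective: simpler
-- what changed: Replaces A's four mutually-resetting syllable flags and index arithmetic with a greedy tokenizer that builds an explicit token list, followed by a separate adjacent-duplicate check over the tokens.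
import Mathlib
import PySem

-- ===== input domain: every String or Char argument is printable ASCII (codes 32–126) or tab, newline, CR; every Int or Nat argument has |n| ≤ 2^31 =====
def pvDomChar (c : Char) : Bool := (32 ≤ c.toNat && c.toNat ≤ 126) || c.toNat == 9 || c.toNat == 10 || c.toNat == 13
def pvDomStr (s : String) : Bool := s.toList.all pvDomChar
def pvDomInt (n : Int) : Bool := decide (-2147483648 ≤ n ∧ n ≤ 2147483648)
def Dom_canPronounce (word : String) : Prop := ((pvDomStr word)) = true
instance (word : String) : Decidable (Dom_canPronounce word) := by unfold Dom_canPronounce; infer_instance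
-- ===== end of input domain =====

-- B replaces A's four mutually-resetting flags with an explicit token list plus a
-- separate adjacent-duplicate pass (objective: simpler decomposition; same O(n) cost).

-- ===== PORT A =====
-- A's while loop over index i with flags a, y, w, m (Python ints 0/1), slices word[i:i+3] / word[i:i+2].
def pyAcanGo (cs : List Char) (a y w m : Int) (i : Nat) : Bool :=
  if _h : i < cs.length then
    if PySem.List.slice cs (some (i : Int)) (some ((i : Int) + 3)) = "aya".toList then
      if a ≠ 0 then false
      else pyAcanGo cs 1 0 0 0 (i + 3)
    else if PySem.List.slice cs (some (i : Int)) (some ((i : Int) + 3)) = "woo".toList then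
      if w ≠ 0 then false
      else pyAcanGo cs 0 0 1 0 (i + 3)
    else if PySem.List.slice cs (some (i : Int)) (some ((i : Int) + 2)) = "ye".toList then
      if y ≠ 0 then false
      else pyAcanGo cs 0 1 0 0 (i + 2)
    else if PySem.List.slice cs (some (i : Int)) (some ((i : Int) + 2)) = "ma".toList then
      if m ≠ 0 then false
      else pyAcanGo cs 0 0 0 1 (i + 2)
    else false
  else true
termination_by cs.length - i

def canPronounce (word : String) : Bool := pyAcanGo word.toList 0 0 0 0 0

-- ===== PORT B =====
-- B's tokenizing loop: greedily consume one syllable per step, collecting the token list.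
def pyBtok (rest : List Char) : Option (List (List Char)) :=
  if _h : rest = [] then some []
  else if rest.take 3 = "aya".toList then (pyBtok (rest.drop 3)).map ("aya".toList :: ·)
  else if rest.take 3 = "woo".toList then (pyBtok (rest.drop 3)).map ("woo".toList :: ·)
  else if rest.take 2 = "ye".toList then (pyBtok (rest.drop 2)).map ("ye".toList :: ·)
  else if rest.take 2 = "ma".toList then (pyBtok (rest.drop 2)).map ("ma".toList :: ·)
  else none
termination_by rest.length
decreasing_by
  all_goals
    have h0 : 0 < rest.length := List.length_pos_of_ne_nil (by assumption)
    simp only [List.length_drop]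
    omega

-- B's second pass: all(prev != cur for prev, cur in zip(tokens, tokens[1:]))
def canPronounce_alt (word : String) : Bool :=
  match pyBtok word.toList with
  | none => false
  | some tokens => (tokens.zip tokens.tail).all (fun p => decide (p.1 ≠ p.2))

-- ===== PRECONDITION & SPEC =====
def Spec_canPronounce (word : String) (out : Bool) : Prop := out = canPronounce_alt word
instance (word : String) (out : Bool) : Decidable (Spec_canPronounce word out) := by unfold Spec_canPronounce; infer_instance

-- ===== CLAIM (what is proved, stated in full; the proofs are below) =====
def Claim_equal_canPronounce : Prop := ∀ (word : String), Dom_canPronounce word → Spec_canPronounce word (canPronounce word)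

-- ===== LEMMAS AND PROOFS =====

-- adjacency check threaded with the previous token (proof-side characterisation)
def pvChk (last : Option (List Char)) : List (List Char) → Bool
  | [] => true
  | t :: ts => if some t = last then false else pvChk (some t) ts

-- A's flags as a function of the last consumed token
def pvFlA (last : Option (List Char)) : Int := if last = some "aya".toList then 1 else 0
def pvFlY (last : Option (List Char)) : Int := if last = some "ye".toList then 1 else 0
def pvFlW (last : Option (List Char)) : Int := if last = some "woo".toList then 1 else 0
def pvFlM (last : Option (List Char)) : Int := if last = some "ma".toList then 1 else 0

lemma pvZip_eq_chk : ∀ (ts : List (List Char)) (t : List Char),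
    (((t :: ts).zip ts).all (fun p => decide (p.1 ≠ p.2))) = pvChk (some t) ts := by
  intro ts
  induction ts with
  | nil => intro t; simp [pvChk]
  | cons u us ih =>
    intro t
    simp only [List.zip_cons_cons, List.all_cons, ih u, pvChk]
    by_cases h : u = t
    · subst h; simp
    · simp [h, Ne.symm h]

lemma pvChk_none : ∀ (ts : List (List Char)),
    ((ts.zip ts.tail).all (fun p => decide (p.1 ≠ p.2))) = pvChk none ts := by
  intro ts
  cases ts with
  | nil => simp [pvChk]
  | cons t ts => simpa [pvChk] using pvZip_eq_chk ts t

lemma pvMain (cs : List Char) : ∀ (n i : Nat) (last : Option (List Char)),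
    cs.length - i ≤ n →
    pyAcanGo cs (pvFlA last) (pvFlY last) (pvFlW last) (pvFlM last) i =
      (match pyBtok (cs.drop i) with
       | none => false
       | some ts => pvChk last ts) := by
  intro n
  induction n with
  | zero =>
    intro i last h
    have hle : cs.length ≤ i := by omega
    rw [pyAcanGo]
    simp [Nat.not_lt.mpr hle, List.drop_eq_nil_of_le hle, pyBtok, pvChk]
  | succ n ih =>
    intro i last h
    by_cases hi : i < cs.length
    · have hrest : cs.drop i ≠ [] := by
        simp [List.drop_eq_nil_iff]; omega
      have hs3 : PySem.List.slice cs (some (i : Int)) (some ((i : Int) + 3)) = (cs.drop i).take 3 := by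
        simpa using PySem.List.slice_natCast_add (xs := cs) (j := i) (n := 3)
      have hs2 : PySem.List.slice cs (some (i : Int)) (some ((i : Int) + 2)) = (cs.drop i).take 2 := by
        simpa using PySem.List.slice_natCast_add (xs := cs) (j := i) (n := 2)
      have hd3 : cs.drop (i + 3) = (cs.drop i).drop 3 := by
        rw [List.drop_drop]
      have hd2 : cs.drop (i + 2) = (cs.drop i).drop 2 := by
        rw [List.drop_drop]
      have hA : pyAcanGo cs (pvFlA last) (pvFlY last) (pvFlW last) (pvFlM last) i =
          (if (cs.drop i).take 3 = "aya".toList then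
             (if pvFlA last ≠ 0 then false else pyAcanGo cs 1 0 0 0 (i + 3))
           else if (cs.drop i).take 3 = "woo".toList then
             (if pvFlW last ≠ 0 then false else pyAcanGo cs 0 0 1 0 (i + 3))
           else if (cs.drop i).take 2 = "ye".toList then
             (if pvFlY last ≠ 0 then false else pyAcanGo cs 0 1 0 0 (i + 2))
           else if (cs.drop i).take 2 = "ma".toList then
             (if pvFlM last ≠ 0 then false else pyAcanGo cs 0 0 0 1 (i + 2))
           else false) := by
        rw [pyAcanGo, dif_pos hi, hs3, hs2]
      have hB : pyBtok (cs.drop i) =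
          (if (cs.drop i).take 3 = "aya".toList then
             (pyBtok ((cs.drop i).drop 3)).map ("aya".toList :: ·)
           else if (cs.drop i).take 3 = "woo".toList then
             (pyBtok ((cs.drop i).drop 3)).map ("woo".toList :: ·)
           else if (cs.drop i).take 2 = "ye".toList then
             (pyBtok ((cs.drop i).drop 2)).map ("ye".toList :: ·)
           else if (cs.drop i).take 2 = "ma".toList then
             (pyBtok ((cs.drop i).drop 2)).map ("ma".toList :: ·)
           else none) := by
        rw [pyBtok, dif_neg hrest]
      by_cases h1 : (cs.drop i).take 3 = "aya".toList

      · -- aya branch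
        rw [hA, hB, if_pos h1, if_pos h1]
        have hrec1 : pyAcanGo cs 1 0 0 0 (i + 3) =
            (match pyBtok ((cs.drop i).drop 3) with
             | none => false
             | some ts => pvChk (some "aya".toList) ts) := by
          have hx := ih (i + 3) (some "aya".toList) (by omega)
          rw [hd3] at hx
          simpa [pvFlA, pvFlY, pvFlW, pvFlM] using hx
        by_cases hl : last = some "aya".toList
        · subst hl
          have hne : pvFlA (some ("aya".toList : List Char)) ≠ 0 := by decide
          rw [if_pos hne]
          cases hp : pyBtok ((cs.drop i).drop 3) with
          | none => rfl
          | some ts =>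
            show false = pvChk (some "aya".toList) ("aya".toList :: ts)
            simp only [pvChk]
            simp
        · have hf0 : pvFlA last = 0 := by unfold pvFlA; rw [if_neg hl]
          have hne2 : some ("aya".toList : List Char) ≠ last := fun hc => hl hc.symm
          rw [if_neg (by simp [hf0])]
          rw [hrec1]
          cases hp : pyBtok ((cs.drop i).drop 3) with
          | none => rfl
          | some ts =>
            show pvChk (some "aya".toList) ts = pvChk last ("aya".toList :: ts)
            simp only [pvChk]
            rw [if_neg hne2]

      by_cases h2 : (cs.drop i).take 3 = "woo".toList

      · -- woo branch
        rw [hA, hB, if_neg h1, if_neg h1, if_pos h2, if_pos h2]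
        have hrec1 : pyAcanGo cs 0 0 1 0 (i + 3) =
            (match pyBtok ((cs.drop i).drop 3) with
             | none => false
             | some ts => pvChk (some "woo".toList) ts) := by
          have hx := ih (i + 3) (some "woo".toList) (by omega)
          rw [hd3] at hx
          simpa [pvFlA, pvFlY, pvFlW, pvFlM] using hx
        by_cases hl : last = some "woo".toList
        · subst hl
          have hne : pvFlW (some ("woo".toList : List Char)) ≠ 0 := by decide
          rw [if_pos hne]
          cases hp : pyBtok ((cs.drop i).drop 3) with
          | none => rfl
          | some ts =>
            show false = pvChk (some "woo".toList) ("woo".toList :: ts)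
            simp only [pvChk]
            simp
        · have hf0 : pvFlW last = 0 := by unfold pvFlW; rw [if_neg hl]
          have hne2 : some ("woo".toList : List Char) ≠ last := fun hc => hl hc.symm
          rw [if_neg (by simp [hf0])]
          rw [hrec1]
          cases hp : pyBtok ((cs.drop i).drop 3) with
          | none => rfl
          | some ts =>
            show pvChk (some "woo".toList) ts = pvChk last ("woo".toList :: ts)
            simp only [pvChk]
            rw [if_neg hne2]

      by_cases h3 : (cs.drop i).take 2 = "ye".toList

      · -- ye branch
        rw [hA, hB, if_neg h1, if_neg h1, if_neg h2, if_neg h2, if_pos h3, if_pos h3]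
        have hrec1 : pyAcanGo cs 0 1 0 0 (i + 2) =
            (match pyBtok ((cs.drop i).drop 2) with
             | none => false
             | some ts => pvChk (some "ye".toList) ts) := by
          have hx := ih (i + 2) (some "ye".toList) (by omega)
          rw [hd2] at hx
          simpa [pvFlA, pvFlY, pvFlW, pvFlM] using hx
        by_cases hl : last = some "ye".toList
        · subst hl
          have hne : pvFlY (some ("ye".toList : List Char)) ≠ 0 := by decide
          rw [if_pos hne]
          cases hp : pyBtok ((cs.drop i).drop 2) with
          | none => rfl
          | some ts =>
            show false = pvChk (some "ye".toList) ("ye".toList :: ts)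
            simp only [pvChk]
            simp
        · have hf0 : pvFlY last = 0 := by unfold pvFlY; rw [if_neg hl]
          have hne2 : some ("ye".toList : List Char) ≠ last := fun hc => hl hc.symm
          rw [if_neg (by simp [hf0])]
          rw [hrec1]
          cases hp : pyBtok ((cs.drop i).drop 2) with
          | none => rfl
          | some ts =>
            show pvChk (some "ye".toList) ts = pvChk last ("ye".toList :: ts)
            simp only [pvChk]
            rw [if_neg hne2]

      by_cases h4 : (cs.drop i).take 2 = "ma".toList

      · -- ma branch
        rw [hA, hB, if_neg h1, if_neg h1, if_neg h2, if_neg h2, if_neg h3, if_neg h3, if_pos h4, if_pos h4]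
        have hrec1 : pyAcanGo cs 0 0 0 1 (i + 2) =
            (match pyBtok ((cs.drop i).drop 2) with
             | none => false
             | some ts => pvChk (some "ma".toList) ts) := by
          have hx := ih (i + 2) (some "ma".toList) (by omega)
          rw [hd2] at hx
          simpa [pvFlA, pvFlY, pvFlW, pvFlM] using hx
        by_cases hl : last = some "ma".toList
        · subst hl
          have hne : pvFlM (some ("ma".toList : List Char)) ≠ 0 := by decide
          rw [if_pos hne]
          cases hp : pyBtok ((cs.drop i).drop 2) with
          | none => rfl
          | some ts =>
            show false = pvChk (some "ma".toList) ("ma".toList :: ts)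
            simp only [pvChk]
            simp
        · have hf0 : pvFlM last = 0 := by unfold pvFlM; rw [if_neg hl]
          have hne2 : some ("ma".toList : List Char) ≠ last := fun hc => hl hc.symm
          rw [if_neg (by simp [hf0])]
          rw [hrec1]
          cases hp : pyBtok ((cs.drop i).drop 2) with
          | none => rfl
          | some ts =>
            show pvChk (some "ma".toList) ts = pvChk last ("ma".toList :: ts)
            simp only [pvChk]
            rw [if_neg hne2]

      · rw [hA, hB, if_neg h1, if_neg h1, if_neg h2, if_neg h2, if_neg h3, if_neg h3,
            if_neg h4, if_neg h4]
    · have hle : cs.length ≤ i := by omega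
      rw [pyAcanGo]
      simp [Nat.not_lt.mpr hle, List.drop_eq_nil_of_le hle, pyBtok, pvChk]

-- ===== VERDICT (by name: the statement is the Claim_ definition above) =====
theorem canPronounce_spec : Claim_equal_canPronounce := by
  intro word _
  unfold Spec_canPronounce canPronounce canPronounce_alt
  have h := pvMain word.toList word.toList.length 0 none (by omega)
  simp only [show pvFlA none = 0 from by simp [pvFlA],
             show pvFlY none = 0 from by simp [pvFlY],
             show pvFlW none = 0 from by simp [pvFlW],
             show pvFlM none = 0 from by simp [pvFlM],
             List.drop_zero] at h
  rw [h]
  cases hp : pyBtok word.toList with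
  | none => rfl
  | some ts => exact (pvChk_none ts).symm
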